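-- pv_equiv track=rewrite | github.com/cyphou/TableauToFabric | tableau_export/dax_converter.py | _reverse_tableau_bracket_escape
-- ===== SOURCE A (Python) =====
-- def _reverse_tableau_bracket_escape(name):
--     """Reverses the Tableau ] → ) substitution in column names.
--
--     Tableau replaces ] with ) in physical column names because
--     ] conflicts with its [field] syntax. To generate Power Query M that
--     references the real column names in the source, we reverse this
--     substitution when ) appears without a matching ( (orphan parenthesis).
--     """
--     opens = name.count('(')
--     closes = name.count(')')
--     excess = closes - opens
--     if excess <= 0:
--         return name
--     result = list(name)
--     replaced = 0
--     for i in range(len(result) - 1, -1, -1):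
--         if result[i] == ')' and replaced < excess:
--             result[i] = ']'
--             replaced += 1
--     return ''.join(result)
-- ===== SOURCE B (Python) =====
-- def _reverse_tableau_bracket_escape(name):
--     """Single forward pass: the ')' that must become ']' are exactly the
--     closing parens whose forward ordinal exceeds the number of '(' in the
--     name (i.e. the last `closes - opens` of them)."""
--     opens = name.count('(')
--     out = []
--     seen = 0
--     for c in name:
--         if c == ')':
--             seen += 1
--             out.append(']' if seen > opens else c)
--         else:
--             out.append(c)
--     return ''.join(out)
-- ===== Notes on version B (the rewrite author's own statement) =====
-- stated objective: simpler
-- what changed: Replaces A's count-then-backward-scan-with-in-place-mutation by a single forward pass that numbers each ')' as it appears and emits ']' exactly when that ordinal exceeds the '(' count (so the last closes-opens of them), never computing closes or touching the string twice.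
import Mathlib
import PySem

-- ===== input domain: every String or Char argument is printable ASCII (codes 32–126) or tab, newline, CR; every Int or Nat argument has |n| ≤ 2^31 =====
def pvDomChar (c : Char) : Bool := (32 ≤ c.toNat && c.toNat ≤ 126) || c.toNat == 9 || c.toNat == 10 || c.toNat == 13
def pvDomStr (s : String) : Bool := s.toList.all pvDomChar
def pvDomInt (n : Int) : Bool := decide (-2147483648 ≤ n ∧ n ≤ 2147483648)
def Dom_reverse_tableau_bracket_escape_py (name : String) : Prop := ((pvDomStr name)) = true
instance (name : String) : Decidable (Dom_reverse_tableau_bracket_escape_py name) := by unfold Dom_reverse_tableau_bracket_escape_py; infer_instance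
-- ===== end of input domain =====

-- B replaces A's backward mutating index scan by a single forward pass that numbers the ')' occurrences (objective: simpler).

-- ===== PORT A =====
def reverse_tableau_bracket_escape_py (name : String) : String :=
  let opens : Int := PySem.Str.count name "("
  let closes : Int := PySem.Str.count name ")"
  let excess : Int := closes - opens
  if excess ≤ 0 then name
  else
    let result := name.toList
    let st := (PySem.List.pyRange ((result.length : Int) - 1) (-1) (-1)).foldl
      (fun (st : List Char × Int) i =>
        if PySem.List.pyGetD st.1 i ' ' = ')' ∧ st.2 < excess
        then (PySem.List.pySetD st.1 i ']', st.2 + 1)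
        else st)
      (result, 0)
    String.ofList st.1

-- ===== PORT B =====
def reverse_tableau_bracket_escape_py_alt (name : String) : String :=
  let opens : Int := PySem.Str.count name "("
  let st := name.toList.foldl
    (fun (st : List Char × Int) c =>
      if c = ')' then (st.1 ++ [if opens < st.2 + 1 then ']' else c], st.2 + 1)
      else (st.1 ++ [c], st.2))
    ([], 0)
  String.ofList st.1

-- ===== PRECONDITION & SPEC =====
def Spec_reverse_tableau_bracket_escape_py (name : String) (out : String) : Prop := out = reverse_tableau_bracket_escape_py_alt name
instance (name : String) (out : String) : Decidable (Spec_reverse_tableau_bracket_escape_py name out) := by unfold Spec_reverse_tableau_bracket_escape_py; infer_instance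

-- ===== CLAIM (what is proved, stated in full; the proofs are below) =====
def Claim_equal_reverse_tableau_bracket_escape_py : Prop := ∀ (name : String), Dom_reverse_tableau_bracket_escape_py name → Spec_reverse_tableau_bracket_escape_py name (reverse_tableau_bracket_escape_py name)

-- ===== LEMMAS AND PROOFS =====

-- `PySem.Chars.count s [c]` is the plain character count (unfolds the fueled substring search).
theorem pvCountGo (c : Char) : ∀ (l : List Char) (fuel acc : ℕ), l.length ≤ fuel →
    PySem.Chars.count.go [c] fuel l acc = acc + l.count c := by
  intro l
  induction l with
  | nil => intro fuel acc h; cases fuel <;> simp [PySem.Chars.count.go]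
  | cons x t ih =>
    intro fuel acc h
    cases fuel with
    | zero => simp at h
    | succ f =>
      have hgo : PySem.Chars.count.go [c] (f+1) (x :: t) acc =
          if [c].isPrefixOf (x :: t) then PySem.Chars.count.go [c] f (List.drop 1 (x::t)) (acc+1)
          else PySem.Chars.count.go [c] f t acc := by
        simp [PySem.Chars.count.go]
      rw [hgo]
      simp at h
      by_cases hc : x = c
      · simp [List.isPrefixOf, hc, ih f (acc+1) (by omega)]
        omega
      · simp [List.isPrefixOf, Ne.symm hc, hc, ih f acc (by omega)]

theorem pvCountChar (s : List Char) (c : Char) : PySem.Chars.count s [c] = s.count c := by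
  simp [PySem.Chars.count]
  have := pvCountGo c s s.length 0 le_rfl
  omega

-- number of ')' in a list, as an Int
def pvClose (l : List Char) : Int := (l.count ')' : Int)

theorem pvClose_nonneg (l : List Char) : 0 ≤ pvClose l := by
  simp [pvClose]

theorem pvClose_cons (c : Char) (t : List Char) :
    pvClose (c :: t) = (if c = ')' then 1 else 0) + pvClose t := by
  by_cases h : c = ')' <;> simp [pvClose, List.count_cons, h] <;> push_cast <;> ring

theorem pvClose_reverse (l : List Char) : pvClose l.reverse = pvClose l := by
  simp [pvClose]

-- A's backward loop, as structural recursion on the REVERSED list: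
-- replace a ')' while fewer than k replacements were made (counter r).
def pvG (k : Int) : List Char → Int → List Char × Int
  | [], r => ([], r)
  | c :: t, r =>
    if c = ')' ∧ r < k then
      let p := pvG k t (r + 1); (']' :: p.1, p.2)
    else
      let p := pvG k t r; (c :: p.1, p.2)

-- replace the first k (budget, decremented at EVERY ')') closing parens
def pvFirst : Int → List Char → List Char
  | _, [] => []
  | k, c :: t => if c = ')' then (if 0 < k then ']' else ')') :: pvFirst (k - 1) t
                 else c :: pvFirst k t

-- keep the first m closing parens, replace the rest (this is what B computes)
def pvLast : Int → List Char → List Char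
  | _, [] => []
  | m, c :: t => if c = ')' then (if 0 < m then ')' else ']') :: pvLast (m - 1) t
                 else c :: pvLast m t

theorem pvFirst_nonpos : ∀ (l : List Char) (k : Int), k ≤ 0 → pvFirst k l = l := by
  intro l
  induction l with
  | nil => intro k _; rfl
  | cons c t ih =>
    intro k hk
    by_cases hc : c = ')'
    · simp [pvFirst, hc, show ¬ (0 < k) by omega, ih (k-1) (by omega)]
    · simp [pvFirst, hc, ih k hk]

theorem pvG_fst (k : Int) : ∀ (l : List Char) (r : Int), (pvG k l r).1 = pvFirst (k - r) l := by
  intro l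
  induction l with
  | nil => intro r; rfl
  | cons c t ih =>
    intro r
    by_cases hc : c = ')'
    · by_cases hr : r < k
      · simp [pvG, hc, hr, pvFirst, show 0 < k - r by omega, ih (r+1)]
        ring_nf
      · simp [pvG, hc, hr, pvFirst, show ¬ 0 < k - r by omega,
              pvFirst_nonpos t (k - r - 1) (by omega), pvFirst_nonpos t (k - r) (by omega), ih r]
    · simp [pvG, hc, pvFirst, ih r]

theorem pvFirst_append : ∀ (xs ys : List Char) (k : Int),
    pvFirst k (xs ++ ys) = pvFirst k xs ++ pvFirst (k - pvClose xs) ys := by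
  intro xs
  induction xs with
  | nil => intro ys k; simp [pvFirst, pvClose]
  | cons c t ih =>
    intro ys k
    by_cases hc : c = ')'
    · simp [pvFirst, hc, ih, pvClose_cons]
      ring_nf
    · simp [pvFirst, hc, ih, pvClose_cons]

theorem pvFirst_rev : ∀ (l : List Char) (k : Int),
    (pvFirst k l.reverse).reverse = pvLast (pvClose l - k) l := by
  intro l
  induction l with
  | nil => intro k; rfl
  | cons c t ih =>
    intro k
    have h1 : (c :: t).reverse = t.reverse ++ [c] := by simp
    rw [h1, pvFirst_append, pvClose_reverse]
    by_cases hc : c = ')'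
    · simp [pvFirst, hc, pvLast, pvClose_cons, ih k]
      constructor
      · split_ifs <;> first | rfl | omega
      · have : 1 + pvClose t - k - 1 = pvClose t - k := by ring
        rw [this]
    · simp [pvFirst, hc, pvLast, pvClose_cons, ih k]

theorem pvLast_all : ∀ (l : List Char) (m : Int), pvClose l ≤ m → pvLast m l = l := by
  intro l
  induction l with
  | nil => intro m _; rfl
  | cons c t ih =>
    intro m hm
    rw [pvClose_cons] at hm
    have hnn := pvClose_nonneg t
    by_cases hc : c = ')'
    · simp [hc] at hm
      simp [pvLast, hc, show 0 < m by omega, ih (m-1) (by omega)]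
    · simp [hc] at hm
      simp [pvLast, hc, ih m hm]

-- B's forward fold computes pvLast
theorem pvBfold (opens : Int) : ∀ (l : List Char) (acc : List Char) (s : Int),
    (l.foldl (fun (st : List Char × Int) c =>
        if c = ')' then (st.1 ++ [if opens < st.2 + 1 then ']' else c], st.2 + 1)
        else (st.1 ++ [c], st.2)) (acc, s)).1 = acc ++ pvLast (opens - s) l := by
  intro l
  induction l with
  | nil => intro acc s; simp [pvLast]
  | cons c t ih =>
    intro acc s
    rw [List.foldl_cons]
    by_cases hc : c = ')'
    · by_cases hs : opens < s + 1
      · rw [show ((if c = ')' then (acc ++ [if opens < s + 1 then ']' else c], s + 1)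
            else (acc ++ [c], s)) = (acc ++ [']'], s + 1)) from by simp [hc, hs], ih]
        simp [pvLast, hc, show ¬ 0 < opens - s from by omega,
              show opens - (s + 1) = opens - s - 1 from by ring]
        omega
      · rw [show ((if c = ')' then (acc ++ [if opens < s + 1 then ']' else c], s + 1)
            else (acc ++ [c], s)) = (acc ++ [')'], s + 1)) from by simp [hc, hs], ih]
        simp [pvLast, hc, show 0 < opens - s from by omega,
              show opens - (s + 1) = opens - s - 1 from by ring]
        omega
    · rw [show ((if c = ')' then (acc ++ [if opens < s + 1 then ']' else c], s + 1)
          else (acc ++ [c], s)) = (acc ++ [c], s)) from by simp [hc], ih]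
      simp [pvLast, hc]

-- a fold over indices < |xs| ignores an appended last element
theorem pvFoldFixLast (excess : Int) :
    ∀ (idxs : List Int) (xs : List Char) (d : Char) (r : Int),
    (∀ i ∈ idxs, 0 ≤ i ∧ i < (xs.length : Int)) →
    (idxs.foldl (fun (st : List Char × Int) i =>
        if PySem.List.pyGetD st.1 i ' ' = ')' ∧ st.2 < excess
        then (PySem.List.pySetD st.1 i ']', st.2 + 1) else st) (xs ++ [d], r)) =
    (((idxs.foldl (fun (st : List Char × Int) i =>
        if PySem.List.pyGetD st.1 i ' ' = ')' ∧ st.2 < excess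
        then (PySem.List.pySetD st.1 i ']', st.2 + 1) else st) (xs, r)).1 ++ [d]),
      (idxs.foldl (fun (st : List Char × Int) i =>
        if PySem.List.pyGetD st.1 i ' ' = ')' ∧ st.2 < excess
        then (PySem.List.pySetD st.1 i ']', st.2 + 1) else st) (xs, r)).2) := by
  intro idxs
  induction idxs with
  | nil => intro xs d r _; rfl
  | cons i rest ih =>
    intro xs d r hb
    obtain ⟨hi0, hilen⟩ := hb i (by simp)
    have hnat : i.toNat < xs.length := by omega
    have hget : PySem.List.pyGetD (xs ++ [d]) i ' ' = PySem.List.pyGetD xs i ' ' := by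
      rw [PySem.List.pyGetD_eq_getElem (xs ++ [d]) ' ' hi0 (by simp; omega),
          PySem.List.pyGetD_eq_getElem xs ' ' hi0 (by omega)]
      exact List.getElem_append_left hnat
    have hset : PySem.List.pySetD (xs ++ [d]) i ']' = PySem.List.pySetD xs i ']' ++ [d] := by
      rw [PySem.List.pySetD_of_nonneg (xs ++ [d]) ']' hi0, PySem.List.pySetD_of_nonneg xs ']' hi0]
      exact List.set_append_left _ _ hnat
    simp only [List.foldl_cons, hget]
    by_cases hc : PySem.List.pyGetD xs i ' ' = ')' ∧ r < excess
    · simp only [hc, and_self, if_pos, hset]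
      exact ih (PySem.List.pySetD xs i ']') d (r + 1)
        (fun j hj => by
          have hjb := hb j (by simp [hj])
          rwa [PySem.List.pySetD_of_nonneg xs ']' hi0, List.length_set])
    · simp only [hc, if_false]
      exact ih xs d r (fun j hj => hb j (by simp [hj]))

-- A's backward index loop equals pvG on the reversed list
theorem pvAfold (excess : Int) : ∀ (l : List Char) (r : Int),
    ((PySem.List.pyRange ((l.length : Int) - 1) (-1) (-1)).foldl
      (fun (st : List Char × Int) i =>
        if PySem.List.pyGetD st.1 i ' ' = ')' ∧ st.2 < excess
        then (PySem.List.pySetD st.1 i ']', st.2 + 1) else st) (l, r)) =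
    ((pvG excess l.reverse r).1.reverse, (pvG excess l.reverse r).2) := by
  intro l
  induction l using List.reverseRecOn with
  | nil =>
    intro r
    rw [PySem.List.pyRange_neg_one_eq_nil (by simp)]
    rfl
  | append_singleton xs c ih =>
    intro r
    have hlen : ((xs ++ [c]).length : Int) - 1 = (xs.length : Int) := by simp
    rw [hlen, PySem.List.pyRange_neg_one_cons (by omega)]
    rw [List.foldl_cons]
    have hget : PySem.List.pyGetD (xs ++ [c]) (xs.length : Int) ' ' = c := by
      rw [PySem.List.pyGetD_eq_getElem (xs ++ [c]) ' ' (by omega) (by simp)]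
      simp
    have hset : PySem.List.pySetD (xs ++ [c]) (xs.length : Int) ']' = xs ++ [']'] := by
      rw [PySem.List.pySetD_of_nonneg (xs ++ [c]) ']' (by omega)]
      simp [List.set_append_right]
    have hbound : ∀ i ∈ PySem.List.pyRange ((xs.length : Int) - 1) (-1) (-1),
        0 ≤ i ∧ i < (xs.length : Int) := by
      intro i hi
      rw [PySem.List.mem_pyRange_neg_one] at hi
      omega
    have hrev : (xs ++ [c]).reverse = c :: xs.reverse := by simp
    rw [hrev]
    by_cases h1 : c = ')'
    · by_cases h2 : r < excess
      · rw [show ((if PySem.List.pyGetD (xs ++ [c]) (xs.length : Int) ' ' = ')' ∧ r < excess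
            then (PySem.List.pySetD (xs ++ [c]) (xs.length : Int) ']', r + 1)
            else (xs ++ [c], r)) = (xs ++ [']'], r + 1)) from by
              rw [hget, hset]; simp [h1, h2]]
        rw [pvFoldFixLast excess _ _ _ _ hbound, ih (r + 1)]
        simp [pvG, h1, h2]
      · rw [show ((if PySem.List.pyGetD (xs ++ [c]) (xs.length : Int) ' ' = ')' ∧ r < excess
            then (PySem.List.pySetD (xs ++ [c]) (xs.length : Int) ']', r + 1)
            else (xs ++ [c], r)) = (xs ++ [c], r)) from by
              rw [hget]; simp [h2]]
        rw [pvFoldFixLast excess _ _ _ _ hbound, ih r]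
        simp [pvG, h1, h2]
    · rw [show ((if PySem.List.pyGetD (xs ++ [c]) (xs.length : Int) ' ' = ')' ∧ r < excess
          then (PySem.List.pySetD (xs ++ [c]) (xs.length : Int) ']', r + 1)
          else (xs ++ [c], r)) = (xs ++ [c], r)) from by
            rw [hget]; simp [h1]]
      rw [pvFoldFixLast excess _ _ _ _ hbound, ih r]
      simp [pvG, h1]

-- ===== VERDICT (by name: the statement is the Claim_ definition above) =====
theorem reverse_tableau_bracket_escape_py_spec : Claim_equal_reverse_tableau_bracket_escape_py := by
  intro name _
  unfold Spec_reverse_tableau_bracket_escape_py reverse_tableau_bracket_escape_py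
    reverse_tableau_bracket_escape_py_alt
  simp only []
  have hcloses : (PySem.Str.count name ")" : Int) = pvClose name.toList := by
    rw [PySem.Str.count_eq]
    have h0 : (")" : String).toList = [')'] := rfl
    rw [h0, pvCountChar]
    rfl
  rw [pvBfold]
  by_cases hx : (PySem.Str.count name ")" : Int) - (PySem.Str.count name "(" : Int) ≤ 0
  · rw [if_pos hx]
    rw [sub_zero, pvLast_all name.toList _ (by rw [hcloses] at hx; omega)]
    simp
  · rw [if_neg hx]
    rw [pvAfold, pvG_fst, sub_zero, pvFirst_rev, hcloses]
    rw [show pvClose name.toList - (pvClose name.toList - (PySem.Str.count name "(" : Int)) =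
        (PySem.Str.count name "(" : Int) - 0 from by ring]
    simp
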